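-- pv_equiv track=rewrite | github.com/Airyshtoteles/learnLeetCode | Day41/Part1/time_warped_subarray_matching.py | factor_info
-- ===== SOURCE A (Python) =====
-- def factor_info(x: int):
--     if x == 0:
--         return (0, -1)  # odd part sentinel -1, exponent unused
--     e = 0
--     while x % 2 == 0:
--         x //= 2
--         e += 1
--     return (x, e)
-- ===== SOURCE B (Python) =====
-- def factor_info(x: int):
--     if x == 0:
--         return (0, -1)
--     e = (x & -x).bit_length() - 1
--     return (x >> e, e)
-- ===== Notes on version B (the rewrite author's own statement) =====
-- stated objective: simpler
-- what changed: Replaces the repeated-halving loop with a closed form: isolate the lowest set bit via x & -x, its bit length (less one) is the dyadic exponent, and a single right shift yields the odd part.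
import Mathlib
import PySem

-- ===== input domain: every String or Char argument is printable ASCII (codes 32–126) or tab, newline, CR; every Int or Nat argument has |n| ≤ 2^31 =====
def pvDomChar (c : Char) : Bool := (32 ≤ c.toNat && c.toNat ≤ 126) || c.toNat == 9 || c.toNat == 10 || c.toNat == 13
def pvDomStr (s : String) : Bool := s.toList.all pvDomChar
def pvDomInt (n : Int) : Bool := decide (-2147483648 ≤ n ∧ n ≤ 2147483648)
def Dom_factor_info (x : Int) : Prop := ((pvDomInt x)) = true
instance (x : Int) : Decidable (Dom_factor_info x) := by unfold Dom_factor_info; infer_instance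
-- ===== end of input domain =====

-- B replaces A's divide-by-2 loop with the closed-form bit trick (x & -x).bit_length() - 1
-- for the 2-adic exponent and one shift for the odd part (objective: simpler).


-- ===== PORT A =====
-- the 'while x % 2 == 0' loop; the x ≠ 0 conjunct is a totality guard only
-- (the loop is never entered with x = 0 in factor_info).
def factorLoop (x e : Int) : Int × Int :=
  if h : PySem.Int.mod x 2 = 0 ∧ x ≠ 0 then
    factorLoop (PySem.Int.floordiv x 2) (e + 1)
  else (x, e)
termination_by x.natAbs
decreasing_by
  rw [PySem.Int.mod_eq_emod_of_pos (by norm_num)] at h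
  rw [PySem.Int.floordiv_eq_ediv_of_pos (by norm_num)]
  omega

def factor_info (x : Int) : Int × Int :=
  if x = 0 then (0, -1) else factorLoop x 0

-- ===== PORT B =====
def factor_info_alt (x : Int) : Int × Int :=
  if x = 0 then (0, -1)
  else
    -- e = (x & -x).bit_length() - 1 ;  return (x >> e, e)
    let e : Nat := PySem.Int.bitLength (PySem.Int.band x (-x)) - 1
    (x >>> e, (e : Int))

-- ===== PRECONDITION & SPEC =====
def Spec_factor_info (x : Int) (out : Int × Int) : Prop := out = factor_info_alt x
instance (x : Int) (out : Int × Int) : Decidable (Spec_factor_info x out) := by unfold Spec_factor_info; infer_instance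

-- ===== CLAIM (what is proved, stated in full; the proofs are below) =====
def Claim_equal_factor_info : Prop := ∀ (x : Int), Dom_factor_info x → Spec_factor_info x (factor_info x)

-- ===== LEMMAS AND PROOFS =====

/-- the lowest-set-bit extraction on naturals: n - (n &&& (n-1)). -/
def natLow (n : Nat) : Nat := n - (n &&& (n - 1))

theorem natLow_pos {n : Nat} (hn : 1 ≤ n) : 1 ≤ natLow n := by
  have h := Nat.and_le_right (n := n) (m := n - 1)
  unfold natLow; omega

theorem natLow_odd (m : Nat) : natLow (2 * m + 1) = 1 := by
  have h := Nat.land_bit true m false m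
  simp [Nat.bit] at h
  unfold natLow
  rw [Nat.add_sub_cancel]
  omega

theorem natLow_even {m : Nat} (hm : 1 ≤ m) : natLow (2 * m) = 2 * natLow m := by
  have h := Nat.land_bit false m true (m - 1)
  simp [Nat.bit] at h
  have h21 : 2 * (m - 1) + 1 = 2 * m - 1 := by omega
  rw [h21] at h
  have hle := Nat.and_le_left (n := m) (m := m - 1)
  unfold natLow
  omega

/-- Python's x & -x equals the lowest set bit of |x|, for x ≠ 0. -/
theorem band_self_neg (x : Int) (hx : x ≠ 0) :
    PySem.Int.band x (-x) = ((natLow x.natAbs : Nat) : Int) := by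
  unfold PySem.Int.band natLow
  rcases lt_or_gt_of_ne hx with hneg | hpos
  · have h1 : ¬ (0 ≤ x) := by omega
    have h2 : (0 : Int) ≤ -x := by omega
    simp only [h1, h2, if_true, if_false]
    have e1 : (-x).toNat = x.natAbs := by omega
    have e2 : (-x - 1).toNat = x.natAbs - 1 := by omega
    rw [e1, e2]
  · have h1 : (0 : Int) ≤ x := by omega
    have h2 : ¬ ((0 : Int) ≤ -x) := by omega
    simp only [h1, h2, if_true, if_false]
    have e1 : x.toNat = x.natAbs := by omega
    have e2 : (-(-x) - 1).toNat = x.natAbs - 1 := by omega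
    rw [e1, e2]

theorem bitLength_two_mul {y : Int} (hy : 1 ≤ y) :
    PySem.Int.bitLength (2 * y) = PySem.Int.bitLength y + 1 := by
  have h := PySem.Int.bitLength_of_pos (n := 2 * y) (by omega)
  rw [PySem.Int.floordiv_eq_ediv_of_pos (by norm_num)] at h
  have : 2 * y / 2 = y := by omega
  rwa [this] at h

theorem bitLength_pos {y : Int} (hy : 1 ≤ y) : 1 ≤ PySem.Int.bitLength y := by
  have h := PySem.Int.bitLength_of_pos (n := y) (by omega)
  omega

/-- the loop invariant: for x ≠ 0, the loop computes exactly B's closed form,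
    adding the 2-adic exponent to the accumulator. -/
theorem factorLoop_eq (n : Nat) : ∀ (x e : Int), x.natAbs = n → x ≠ 0 →
    factorLoop x e =
      (x >>> (PySem.Int.bitLength (PySem.Int.band x (-x)) - 1),
       e + ((PySem.Int.bitLength (PySem.Int.band x (-x)) - 1 : Nat) : Int)) := by
  induction n using Nat.strong_induction_on with
  | _ n ih =>
    intro x e hn hx
    rw [band_self_neg x hx]
    by_cases hev : x % 2 = 0
    · -- even: one loop step, then the induction hypothesis at x / 2
      have hq : x / 2 ≠ 0 := by omega
      have habs : x.natAbs = 2 * (x / 2).natAbs := by omega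
      have hlt : (x / 2).natAbs < n := by omega
      have hstep : factorLoop x e = factorLoop (x / 2) (e + 1) := by
        rw [factorLoop]
        rw [dif_pos ⟨by rw [PySem.Int.mod_eq_emod_of_pos (by norm_num)]; exact hev, hx⟩]
        rw [PySem.Int.floordiv_eq_ediv_of_pos (by norm_num)]
      rw [hstep, ih _ hlt (x / 2) (e + 1) rfl hq, band_self_neg _ hq]
      have hq1 : 1 ≤ (x / 2).natAbs := by omega
      have hlow : natLow x.natAbs = 2 * natLow (x / 2).natAbs := by
        rw [habs, natLow_even hq1]
      have hlp : 1 ≤ natLow (x / 2).natAbs := natLow_pos hq1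
      have hcast : ((natLow x.natAbs : Nat) : Int) = 2 * ((natLow (x / 2).natAbs : Nat) : Int) := by
        rw [hlow]; push_cast; ring
      have hbl : PySem.Int.bitLength ((natLow x.natAbs : Nat) : Int)
          = PySem.Int.bitLength ((natLow (x / 2).natAbs : Nat) : Int) + 1 := by
        rw [hcast, bitLength_two_mul (by exact_mod_cast hlp)]
      have hblp : 1 ≤ PySem.Int.bitLength ((natLow (x / 2).natAbs : Nat) : Int) :=
        bitLength_pos (by exact_mod_cast hlp)
      set t := PySem.Int.bitLength ((natLow (x / 2).natAbs : Nat) : Int) - 1 with ht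
      have hsub : PySem.Int.bitLength ((natLow x.natAbs : Nat) : Int) - 1 = t + 1 := by
        rw [hbl]; omega
      rw [hsub]
      have hshift : x >>> (t + 1) = (x / 2) >>> t := by
        rw [Int.shiftRight_eq_div_pow, Int.shiftRight_eq_div_pow,
            Int.ediv_ediv_of_nonneg (by norm_num)]
        congr 1
        push_cast
        ring
      rw [Prod.mk.injEq]
      exact ⟨hshift.symm, by push_cast; ring⟩
    · -- odd: the loop stops immediately, and natLow |x| = 1
      have hstop : factorLoop x e = (x, e) := by
        rw [factorLoop]
        rw [dif_neg]
        rw [PySem.Int.mod_eq_emod_of_pos (by norm_num)]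
        intro ⟨h1, _⟩; exact hev h1
      have hoddabs : ∃ m, x.natAbs = 2 * m + 1 := ⟨x.natAbs / 2, by omega⟩
      obtain ⟨m, hm⟩ := hoddabs
      rw [hm, natLow_odd]
      have h1 : PySem.Int.bitLength (1 : Int) = 1 := by decide
      rw [hstop]
      simp [h1]

-- ===== VERDICT (by name: the statement is the Claim_ definition above) =====
theorem factor_info_spec : Claim_equal_factor_info := by
  intro x _
  unfold Spec_factor_info factor_info factor_info_alt
  by_cases hx : x = 0
  · simp [hx]
  · simp only [hx, if_false]
    exact factorLoop_eq x.natAbs x 0 rfl hx |>.trans (by simp)
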